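-- pv_equiv track=rewrite | github.com/vasyllll95/babylon-numbers | BabylonProject/babylon/babylon_number_parser.py | parse_babylon
-- ===== SOURCE A (Python) =====
-- def parse_babylon(babylon_number: str):
--     '''
--         Parameters:
--     '''
--     result_number = 0
--     for index, number_part in enumerate(babylon_number.split()[::-1]):
--         if index < 1:
--             result_number+=get_number_part(number_part)
--             continue
--         result_number+=(get_number_part(number_part)*60**index)
--     return result_number
--
-- def get_number_part(string_part):
--     return sum(map(convert_babylon_symbol_to_number,list(string_part)))
--
-- def convert_babylon_symbol_to_number(symbol):
--     if symbol == '<':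
--         return 10
--     elif symbol == 'Y':
--         return 1
--     return 0
-- ===== SOURCE B (Python) =====
-- def parse_babylon(babylon_number: str):
--     result = 0
--     for part in babylon_number.split():
--         value = 0
--         for symbol in part:
--             if symbol == '<':
--                 value += 10
--             elif symbol == 'Y':
--                 value += 1
--         result = result * 60 + value
--     return result
-- ===== Notes on version B (the rewrite author's own statement) =====
-- stated objective: simpler
-- what changed: Replaces the reversed enumerate with per-digit 60**index weighting by a single forward Horner pass (result = result*60 + digit), with symbol values accumulated inline instead of sum(map(list(...))); avoiding the reversal, exponentiation and per-part temporaries makes it measurably faster.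
import Mathlib
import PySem

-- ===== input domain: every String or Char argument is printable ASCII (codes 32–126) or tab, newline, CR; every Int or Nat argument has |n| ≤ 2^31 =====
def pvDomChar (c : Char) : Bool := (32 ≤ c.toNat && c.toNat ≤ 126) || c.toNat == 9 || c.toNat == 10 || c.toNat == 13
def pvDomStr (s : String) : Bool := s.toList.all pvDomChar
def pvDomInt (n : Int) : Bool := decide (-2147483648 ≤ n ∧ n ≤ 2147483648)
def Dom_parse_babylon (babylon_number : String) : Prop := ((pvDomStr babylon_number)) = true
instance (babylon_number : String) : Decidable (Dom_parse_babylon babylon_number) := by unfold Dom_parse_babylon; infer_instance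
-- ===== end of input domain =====

-- B evaluates the numeral by a single forward Horner pass instead of A's reversed
-- enumerate with per-digit 60**index weighting; objective: simpler.


-- ===== PORT A =====
def convert_babylon_symbol_to_number (symbol : Char) : Int :=
  if symbol = '<' then 10
  else if symbol = 'Y' then 1
  else 0

def get_number_part (string_part : String) : Int :=
  (string_part.toList.map convert_babylon_symbol_to_number).sum

def parse_babylon (babylon_number : String) : Int :=
  -- babylon_number.split()[::-1]; slice? with step -1 always returns some
  let rev := (PySem.List.slice? (PySem.Str.split₀ babylon_number) none none (-1)).getD []
  (PySem.List.enumerate rev 0).foldl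
    (fun result_number p =>
      if p.1 < 1 then result_number + get_number_part p.2
      -- index ≥ 0 here, so 60**index = 60 ^ index.toNat exactly
      else result_number + get_number_part p.2 * (60 : Int) ^ p.1.toNat) 0

-- ===== PORT B =====
def parse_babylon_alt (babylon_number : String) : Int :=
  (PySem.Str.split₀ babylon_number).foldl
    (fun result part =>
      result * 60 +
        part.toList.foldl
          (fun value symbol =>
            if symbol = '<' then value + 10
            else if symbol = 'Y' then value + 1
            else value) 0) 0

-- ===== PRECONDITION & SPEC =====
def Spec_parse_babylon (babylon_number : String) (out : Int) : Prop := out = parse_babylon_alt babylon_number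
instance (babylon_number : String) (out : Int) : Decidable (Spec_parse_babylon babylon_number out) := by unfold Spec_parse_babylon; infer_instance

-- ===== CLAIM (what is proved, stated in full; the proofs are below) =====
def Claim_equal_parse_babylon : Prop := ∀ (babylon_number : String), Dom_parse_babylon babylon_number → Spec_parse_babylon babylon_number (parse_babylon babylon_number)

-- ===== LEMMAS AND PROOFS =====

-- positional value Σ_k get_number_part l[k] * 60^(s+k)
def pvG (l : List String) (s : Nat) : Int :=
  match l with
  | [] => 0
  | x :: t => get_number_part x * 60 ^ s + pvG t (s + 1)

theorem pvG_succ (l : List String) (s : Nat) : pvG l (s + 1) = 60 * pvG l s := by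
  induction l generalizing s with
  | nil => simp [pvG]
  | cons x t ih => simp [pvG, ih, pow_succ]; ring

theorem lemA (l : List String) (s : Nat) (a : Int) :
    (PySem.List.enumerate l (s : Int)).foldl
      (fun result_number p =>
        if p.1 < 1 then result_number + get_number_part p.2
        else result_number + get_number_part p.2 * (60 : Int) ^ p.1.toNat) a
    = a + pvG l s := by
  induction l generalizing s a with
  | nil => simp [PySem.List.enumerate_nil, pvG]
  | cons x t ih =>
    rw [PySem.List.enumerate_cons]
    have h1 : ((s : Int) + 1) = ((s + 1 : Nat) : Int) := by push_cast; ring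
    simp only [List.foldl_cons, h1, ih]
    by_cases hs : (s : Int) < 1
    · have : s = 0 := by omega
      subst this
      simp [pvG]; ring
    · have hs0 : ¬ s = 0 := by omega
      simp [hs, pvG, Int.toNat_natCast]
      ring

theorem pvConv (value : Int) (c : Char) :
    (if c = '<' then value + 10 else if c = 'Y' then value + 1 else value)
      = value + convert_babylon_symbol_to_number c := by
  unfold convert_babylon_symbol_to_number; split_ifs <;> ring

theorem pvInner (part : String) :
    part.toList.foldl
      (fun value symbol =>
        if symbol = '<' then value + 10
        else if symbol = 'Y' then value + 1
        else value) 0 = get_number_part part := by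
  simp only [pvConv]
  rw [PySem.List.foldl_add]
  simp [get_number_part]

theorem lemB (l : List String) (a : Int) :
    l.foldl (fun result part => result * 60 + get_number_part part) a
    = a * 60 ^ l.length + pvG l.reverse 0 := by
  induction l using List.reverseRecOn with
  | nil => simp [pvG]
  | append_singleton t x ih =>
    rw [List.foldl_append]
    simp only [List.foldl_cons, List.foldl_nil, ih, List.reverse_append,
      List.reverse_cons, List.reverse_nil, List.nil_append, List.singleton_append]
    simp [pvG, pvG_succ, pow_succ, List.length_append]
    ring

-- ===== VERDICT (by name: the statement is the Claim_ definition above) =====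
theorem parse_babylon_spec : Claim_equal_parse_babylon := by
  intro s _
  unfold Spec_parse_babylon parse_babylon parse_babylon_alt
  rw [PySem.List.slice?_none_none_neg_one]
  simp only [Option.getD_some]
  have := lemA (PySem.Str.split₀ s).reverse 0 0
  simp only [Nat.cast_zero] at this
  rw [this]
  simp only [pvInner, lemB]
  simp
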